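-- pv_equiv track=rewrite | github.com/Rakib-Hasan-Rahad/rna-motif-visualizer | rna_motif_visualizer/loader.py | _identify_strands
-- ===== SOURCE A (Python) =====
-- def _identify_strands(residues_with_pos):
--     """
--     Fallback: Identify separate strands by detecting gaps in residue numbers.
--     Used when chainbreak metadata is not available.
--
--     Args:
--         residues_with_pos: List of (nucleotide, resi, chain) tuples
--
--     Returns:
--         Dict mapping chain to list of strand ranges [(start, end), ...]
--     """
--     strands_by_chain = {}
--
--     for res in residues_with_pos:
--         if isinstance(res, tuple) and len(res) >= 3:
--             nucleotide, resi, chain = res[0], res[1], res[2]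
--
--             if chain not in strands_by_chain:
--                 strands_by_chain[chain] = []
--
--             strands_by_chain[chain].append(resi)
--
--     # For each chain, identify contiguous ranges (strands)
--     strand_ranges = {}
--     for chain in strands_by_chain:
--         positions = sorted(set(strands_by_chain[chain]))
--
--         if not positions:
--             continue
--
--         ranges = []
--         current_start = positions[0]
--         current_end = positions[0]
--
--         for pos in positions[1:]:
--             if pos == current_end + 1:
--                 # Contiguous, extend current range
--                 current_end = pos
--             else:
--                 # Gap detected, save current range and start new one
--                 ranges.append((current_start, current_end))
--                 current_start = pos
--                 current_end = pos
--
--         # Add final range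
--         ranges.append((current_start, current_end))
--         strand_ranges[chain] = ranges
--
--     return strand_ranges
-- ===== SOURCE B (Python) =====
-- def _identify_strands(residues_with_pos):
--     by_chain = {}
--     for res in residues_with_pos:
--         if isinstance(res, tuple) and len(res) >= 3:
--             chain = res[2]
--             by_chain[chain] = by_chain.get(chain, []) + [res[1]]
--
--     strand_ranges = {}
--     for chain, resis in by_chain.items():
--         ranges = []
--         for p in reversed(sorted(set(resis))):
--             if ranges and ranges[0][0] == p + 1:
--                 ranges[0] = (p, ranges[0][1])
--             else:
--                 ranges.insert(0, (p, p))
--         strand_ranges[chain] = ranges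
--     return strand_ranges
-- ===== Notes on version B (the rewrite author's own statement) =====
-- stated objective: alternative
-- what changed: The manual running-start/running-end gap loop is replaced by building each chain's range list back-to-front, merging each position into the head range of the accumulated list; the bucketing loop is rewritten with dict.get instead of a membership test plus append.
import Mathlib
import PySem

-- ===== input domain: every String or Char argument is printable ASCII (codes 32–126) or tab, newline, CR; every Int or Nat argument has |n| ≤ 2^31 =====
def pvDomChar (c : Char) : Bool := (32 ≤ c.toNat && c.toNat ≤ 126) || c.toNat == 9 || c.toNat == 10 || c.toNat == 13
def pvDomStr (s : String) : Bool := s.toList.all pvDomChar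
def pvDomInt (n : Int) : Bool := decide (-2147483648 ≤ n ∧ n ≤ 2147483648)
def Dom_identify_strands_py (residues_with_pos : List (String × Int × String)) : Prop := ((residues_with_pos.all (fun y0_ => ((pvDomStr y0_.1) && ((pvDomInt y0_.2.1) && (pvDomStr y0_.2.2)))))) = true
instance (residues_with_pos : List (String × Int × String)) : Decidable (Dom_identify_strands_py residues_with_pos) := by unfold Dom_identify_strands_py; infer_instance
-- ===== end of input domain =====

-- B builds each chain's range list back-to-front (merge into the head range) instead of
-- A's running-start/running-end accumulator loop; same results, similar cost (objective: alternative).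

-- ===== PORT A =====
-- the inner 'for pos in positions[1:]' loop of A, with its state (ranges, current_start, current_end)
def pvRangesLoopA (ps : List Int) (acc : List (Int × Int)) (cs ce : Int) : List (Int × Int) :=
  match ps with
  | [] => acc ++ [(cs, ce)]
  | p :: t => if p = ce + 1 then pvRangesLoopA t acc cs p else pvRangesLoopA t (acc ++ [(cs, ce)]) p p

def identify_strands_py (residues_with_pos : List (String × Int × String)) : List (String × List (Int × Int)) :=
  let strands_by_chain : PySem.Dict String (List Int) :=
    residues_with_pos.foldl (fun d res =>
      let d' := if d.contains res.2.2 then d else d.insert res.2.2 []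
      d'.modify res.2.2 [] (fun l => l ++ [res.2.1])) PySem.Dict.empty
  let strand_ranges : PySem.Dict String (List (Int × Int)) :=
    strands_by_chain.items.foldl (fun out kv =>
      let positions := PySem.List.sorted (PySem.Set.ofList kv.2) (fun x => x) false
      match positions with
      | [] => out
      | p0 :: rest => out.insert kv.1 (pvRangesLoopA rest [] p0 p0)) PySem.Dict.empty
  strand_ranges.items

-- ===== PORT B =====
-- merge position p into the head of the already-built (suffix) range list
def pvMergeStep (p : Int) (out : List (Int × Int)) : List (Int × Int) :=
  match out with
  | (a, b) :: rest => if a = p + 1 then (p, b) :: rest else (p, p) :: (a, b) :: rest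
  | [] => [(p, p)]

def identify_strands_py_alt (residues_with_pos : List (String × Int × String)) : List (String × List (Int × Int)) :=
  let by_chain : PySem.Dict String (List Int) :=
    residues_with_pos.foldl (fun d res =>
      d.insert res.2.2 (d.getD res.2.2 [] ++ [res.2.1])) PySem.Dict.empty
  let strand_ranges : PySem.Dict String (List (Int × Int)) :=
    by_chain.items.foldl (fun out kv =>
      out.insert kv.1 ((PySem.List.sorted (PySem.Set.ofList kv.2) (fun x => x) false).reverse.foldl
        (fun ranges p => pvMergeStep p ranges) [])) PySem.Dict.empty
  strand_ranges.items

-- ===== PRECONDITION & SPEC =====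
def Spec_identify_strands_py (residues_with_pos : List (String × Int × String)) (out : List (String × List (Int × Int))) : Prop := out = identify_strands_py_alt residues_with_pos
instance (residues_with_pos : List (String × Int × String)) (out : List (String × List (Int × Int))) : Decidable (Spec_identify_strands_py residues_with_pos out) := by unfold Spec_identify_strands_py; infer_instance

-- ===== CLAIM (what is proved, stated in full; the proofs are below) =====
def Claim_equal_identify_strands_py : Prop := ∀ (residues_with_pos : List (String × Int × String)), Dom_identify_strands_py residues_with_pos → Spec_identify_strands_py residues_with_pos (identify_strands_py residues_with_pos)

-- ===== LEMMAS AND PROOFS =====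

-- the two bucketing steps build the same dict
theorem pv_step_eq (d : PySem.Dict String (List Int)) (res : String × Int × String) :
    (let d' := if d.contains res.2.2 then d else d.insert res.2.2 []
     d'.modify res.2.2 [] (fun l => l ++ [res.2.1]))
      = d.insert res.2.2 (d.getD res.2.2 [] ++ [res.2.1]) := by
  by_cases h : d.contains res.2.2 = true
  · simp [h, PySem.Dict.modify]
  · simp only [Bool.not_eq_true] at h
    simp [h, PySem.Dict.modify, PySem.Dict.getD_insert_self, PySem.Dict.insert_insert_self,
      PySem.Dict.getD_of_not_contains]

-- every value of the bucketing dict is a nonempty list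
theorem pv_values_ne_nil (l : List (String × Int × String)) (d : PySem.Dict String (List Int))
    (h : ∀ v ∈ d.values, v ≠ []) :
    ∀ v ∈ (l.foldl (fun d res => d.insert res.2.2 (d.getD res.2.2 [] ++ [res.2.1])) d).values, v ≠ [] := by
  induction l generalizing d with
  | nil => exact h
  | cons x t ih =>
      simp only [List.foldl_cons]
      apply ih
      intro v hv
      rcases PySem.Dict.mem_values_insert _ _ _ _ hv with h1 | h1
      · subst h1; simp
      · exact h v h1

-- A's loop with accumulator pulled out
theorem pvRangesLoopA_acc (ps : List Int) (acc : List (Int × Int)) (cs ce : Int) :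
    pvRangesLoopA ps acc cs ce = acc ++ pvRangesLoopA ps [] cs ce := by
  induction ps generalizing acc cs ce with
  | nil => simp [pvRangesLoopA]
  | cons p t ih =>
      simp only [pvRangesLoopA]
      by_cases h : p = ce + 1
      · rw [if_pos h, if_pos h]
        exact ih acc cs p
      · rw [if_neg h, if_neg h, ih (acc ++ [(cs, ce)]) p p, ih ([] ++ [(cs, ce)]) p p]
        simp

-- A's loop from state (cs, ce) equals B's back-to-front merge of the tail, merged with (cs, ce)
theorem pv_loop_eq_merge (t : List Int) (cs ce : Int) :
    pvRangesLoopA t [] cs ce =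
      match t.foldr pvMergeStep [] with
      | [] => [(cs, ce)]
      | (a, b) :: rest => if a = ce + 1 then (cs, b) :: rest else (cs, ce) :: (a, b) :: rest := by
  induction t generalizing cs ce with
  | nil => simp [pvRangesLoopA]
  | cons p t ih =>
      simp only [pvRangesLoopA, List.foldr_cons]
      by_cases h : p = ce + 1
      · subst h
        rw [if_pos rfl, ih]
        rcases ht : t.foldr pvMergeStep [] with _ | ⟨⟨a, b⟩, rest⟩
        · simp [pvMergeStep]
        · by_cases h2 : a = ce + 1 + 1 <;> simp [pvMergeStep, h2]
      · rw [if_neg h, pvRangesLoopA_acc, ih]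
        rcases ht : t.foldr pvMergeStep [] with _ | ⟨⟨a, b⟩, rest⟩
        · simp [pvMergeStep, h]
        · by_cases h2 : a = p + 1 <;> simp [pvMergeStep, h, h2]

-- per-chain: A's gap loop on a nonempty positions list equals B's reversed merge loop
theorem pv_ranges_eq (p0 : Int) (rest : List Int) :
    pvRangesLoopA rest [] p0 p0 = (p0 :: rest).reverse.foldl (fun ranges p => pvMergeStep p ranges) [] := by
  rw [List.foldl_reverse]
  simp only [List.foldr_cons]
  rw [pv_loop_eq_merge]
  rcases ht : rest.foldr pvMergeStep [] with _ | ⟨⟨a, b⟩, r⟩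
  · simp [pvMergeStep]
  · by_cases h2 : a = p0 + 1 <;> simp [pvMergeStep, h2]

-- ===== VERDICT (by name: the statement is the Claim_ definition above) =====
theorem identify_strands_py_spec : Claim_equal_identify_strands_py := by
  intro l _
  unfold Spec_identify_strands_py
  simp only [identify_strands_py, identify_strands_py_alt]
  have hb : (l.foldl (fun d res =>
        let d' := if d.contains res.2.2 then d else d.insert res.2.2 []
        d'.modify res.2.2 [] (fun l => l ++ [res.2.1])) PySem.Dict.empty)
      = l.foldl (fun d res => d.insert res.2.2 (d.getD res.2.2 [] ++ [res.2.1])) PySem.Dict.empty := by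
    apply PySem.List.foldl_congr_mem
    intro acc x _
    exact pv_step_eq acc x
  rw [hb]
  congr 1
  apply PySem.List.foldl_congr_mem
  intro out kv hkv
  have hne : kv.2 ≠ [] := by
    apply pv_values_ne_nil l PySem.Dict.empty (by simp [PySem.Dict.values, PySem.Dict.empty])
    simp only [PySem.Dict.values]
    exact List.mem_map_of_mem hkv
  have hps : PySem.List.sorted (PySem.Set.ofList kv.2) (fun x => x) false ≠ [] := by
    rw [Ne, PySem.List.sorted_eq_nil_iff]
    intro hs
    rcases hx : kv.2 with _ | ⟨x, t⟩
    · exact hne hx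
    · have hmem : x ∈ PySem.Set.ofList kv.2 := by
        rw [PySem.Set.mem_ofList, hx]; simp
      rw [hs] at hmem
      cases hmem
  rcases hp : PySem.List.sorted (PySem.Set.ofList kv.2) (fun x => x) false with _ | ⟨p0, rest⟩
  · exact absurd hp hps
  · simp only []
    rw [pv_ranges_eq p0 rest]
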